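-- pv_equiv track=rewrite | github.com/ModerRAS/mountblade-code | TaleWorlds.Native/src/scripts/beautify_05_networking_remaining.py | rename_functions
-- ===== SOURCE A (Python) =====
-- def rename_functions(content):
--     """重命名函数"""
--     function_mappings = {
--         # 网络数据搜索函数
--         'FUN_18087b750': 'ProcessNetworkDataSearchFirstInstance',
--         'FUN_18087b76a': 'ProcessNetworkDataSearchSecondInstance',
--         'FUN_18087b883': 'ProcessNetworkDataSearchThirdInstance',
--         'FUN_18087b970': 'ProcessNetworkDataSearchFourthInstance',
--         'FUN_18087b993': 'ProcessNetworkDataSearchFifthInstance',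
--         'FUN_18087ba80': 'ProcessNetworkDataSearchSixthInstance',
--         'FUN_18087ba9a': 'ProcessNetworkDataSearchSeventhInstance',
--         'FUN_18087bbb0': 'ProcessNetworkDataSearchEighthInstance',
--         'FUN_18087bbd3': 'ProcessNetworkDataSearchNinthInstance',
--         'FUN_18087bca0': 'ProcessNetworkDataSearchTenthInstance',
--         'FUN_18087bcc3': 'ProcessNetworkDataSearchEleventhInstance',
--         'FUN_18087bdd0': 'ProcessNetworkDataSearchTwelfthInstance',
--         'FUN_18087bdea': 'ProcessNetworkDataSearchThirteenthInstance',
--         'FUN_18087bee0': 'ProcessNetworkDataSearchFourteenthInstance',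
--         'FUN_18087bf03': 'ProcessNetworkDataSearchFifteenthInstance',
--         'FUN_18087c163': 'ProcessNetworkDataSearchSixteenthInstance',
--
--         # 获取网络句柄函数
--         'FUN_18087b93b': 'GetNetworkHandleFirstInstance',
--         'FUN_18087ba4b': 'GetNetworkHandleSecondInstance',
--         'FUN_18087bb5f': 'GetNetworkHandleThirdInstance',
--         'FUN_18087bc8b': 'GetNetworkHandleFourthInstance',
--         'FUN_18087bd7b': 'GetNetworkHandleFifthInstance',
--         'FUN_18087beaf': 'GetNetworkHandleSixthInstance'
--     }
--
--     for old_name, new_name in function_mappings.items():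
--         content = content.replace(old_name, new_name)
--
--     return content
-- ===== SOURCE B (Python) =====
-- def rename_functions(content):
--     """重命名函数"""
--     ordinals = ['First', 'Second', 'Third', 'Fourth', 'Fifth', 'Sixth',
--                 'Seventh', 'Eighth', 'Ninth', 'Tenth', 'Eleventh', 'Twelfth',
--                 'Thirteenth', 'Fourteenth', 'Fifteenth', 'Sixteenth']
--     search_sfx = ['b750', 'b76a', 'b883', 'b970', 'b993', 'ba80', 'ba9a',
--                   'bbb0', 'bbd3', 'bca0', 'bcc3', 'bdd0', 'bdea', 'bee0',
--                   'bf03', 'c163']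
--     handle_sfx = ['b93b', 'ba4b', 'bb5f', 'bc8b', 'bd7b', 'beaf']
--     table = {s: 'ProcessNetworkDataSearch' + o + 'Instance'
--              for s, o in zip(search_sfx, ordinals)}
--     table.update((s, 'GetNetworkHandle' + o + 'Instance')
--                  for s, o in zip(handle_sfx, ordinals))
--     out = []
--     i = 0
--     n = len(content)
--     while i < n:
--         if content.startswith('FUN_18087', i):
--             rep = table.get(content[i + 9:i + 13])
--             if rep is not None:
--                 out.append(rep)
--                 i += 13
--                 continue
--         out.append(content[i])
--         i += 1
--     return ''.join(out)
-- ===== Notes on version B (the rewrite author's own statement) =====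
-- stated objective: alternative
-- what changed: Replaces A's 22 sequential full-text str.replace passes by a single left-to-right scan that anchors on the 9-character prefix shared by all keys and resolves the 4-char suffix in a table built from ordinal/suffix lists.
import Mathlib
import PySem

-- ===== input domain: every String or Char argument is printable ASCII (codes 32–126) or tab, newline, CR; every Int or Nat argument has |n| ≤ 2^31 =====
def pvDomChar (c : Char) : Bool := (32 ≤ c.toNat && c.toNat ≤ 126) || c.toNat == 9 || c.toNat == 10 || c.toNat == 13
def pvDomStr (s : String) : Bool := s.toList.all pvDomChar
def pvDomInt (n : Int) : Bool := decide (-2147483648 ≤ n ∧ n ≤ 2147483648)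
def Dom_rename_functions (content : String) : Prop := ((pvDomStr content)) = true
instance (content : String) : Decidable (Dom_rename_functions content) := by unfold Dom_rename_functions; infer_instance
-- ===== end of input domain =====

-- B replaces A's 22 sequential full-text str.replace passes by ONE left-to-right scan that looks
-- for the 9-char anchor prefix shared by all keys and then resolves the 4-char suffix in a table built from
-- ordinal/suffix lists; objective: alternative (one pass over the text instead of 22).

-- ===== PORT A =====
-- A's dict literal, in insertion order
def pvMaps : List (String × String) := [
  ("FUN_18087b750", "ProcessNetworkDataSearchFirstInstance"),
  ("FUN_18087b76a", "ProcessNetworkDataSearchSecondInstance"),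
  ("FUN_18087b883", "ProcessNetworkDataSearchThirdInstance"),
  ("FUN_18087b970", "ProcessNetworkDataSearchFourthInstance"),
  ("FUN_18087b993", "ProcessNetworkDataSearchFifthInstance"),
  ("FUN_18087ba80", "ProcessNetworkDataSearchSixthInstance"),
  ("FUN_18087ba9a", "ProcessNetworkDataSearchSeventhInstance"),
  ("FUN_18087bbb0", "ProcessNetworkDataSearchEighthInstance"),
  ("FUN_18087bbd3", "ProcessNetworkDataSearchNinthInstance"),
  ("FUN_18087bca0", "ProcessNetworkDataSearchTenthInstance"),
  ("FUN_18087bcc3", "ProcessNetworkDataSearchEleventhInstance"),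
  ("FUN_18087bdd0", "ProcessNetworkDataSearchTwelfthInstance"),
  ("FUN_18087bdea", "ProcessNetworkDataSearchThirteenthInstance"),
  ("FUN_18087bee0", "ProcessNetworkDataSearchFourteenthInstance"),
  ("FUN_18087bf03", "ProcessNetworkDataSearchFifteenthInstance"),
  ("FUN_18087c163", "ProcessNetworkDataSearchSixteenthInstance"),
  ("FUN_18087b93b", "GetNetworkHandleFirstInstance"),
  ("FUN_18087ba4b", "GetNetworkHandleSecondInstance"),
  ("FUN_18087bb5f", "GetNetworkHandleThirdInstance"),
  ("FUN_18087bc8b", "GetNetworkHandleFourthInstance"),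
  ("FUN_18087bd7b", "GetNetworkHandleFifthInstance"),
  ("FUN_18087beaf", "GetNetworkHandleSixthInstance")]

-- A: for old_name, new_name in function_mappings.items(): content = content.replace(old_name, new_name)
def rename_functions (content : String) : String :=
  (PySem.Dict.ofList pvMaps).items.foldl (fun c p => PySem.Str.replace c p.1 p.2) content

-- ===== PORT B =====
-- B (Source B): the table is built from the ordinal list and the two 4-char-suffix lists
-- (dict comprehension + update → association list, suffixes are pairwise distinct), then ONE
-- while-loop over the text: at each position, if it startswith 'FUN_18087' and the next 4 chars
-- are a table key, emit the table value and advance 13, else emit the character and advance 1.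
def pvOrds : List String := ["First", "Second", "Third", "Fourth", "Fifth", "Sixth",
  "Seventh", "Eighth", "Ninth", "Tenth", "Eleventh", "Twelfth",
  "Thirteenth", "Fourteenth", "Fifteenth", "Sixteenth"]
def pvSearchSfx : List String := ["b750", "b76a", "b883", "b970", "b993", "ba80", "ba9a",
  "bbb0", "bbd3", "bca0", "bcc3", "bdd0", "bdea", "bee0", "bf03", "c163"]
def pvHandleSfx : List String := ["b93b", "ba4b", "bb5f", "bc8b", "bd7b", "beaf"]

def pvTable : List (List Char × List Char) :=
  ((pvSearchSfx.map String.toList).zip (pvOrds.map String.toList)).map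
    (fun q => (q.1, "ProcessNetworkDataSearch".toList ++ q.2 ++ "Instance".toList))
  ++ ((pvHandleSfx.map String.toList).zip (pvOrds.map String.toList)).map
    (fun q => (q.1, "GetNetworkHandle".toList ++ q.2 ++ "Instance".toList))

def pvAnchor : List Char := "FUN_18087".toList

-- the while loop, as fuel recursion over the remaining characters (fuel = remaining length;
-- content.startswith('FUN_18087', i) → isPrefixOf on the suffix, content[i+9:i+13] → drop 9/take 4:
-- hand-ported, exact because both slice bounds are nonnegative)
def pvBLoop : Nat → List Char → List Char
  | 0, s => s
  | _+1, [] => []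
  | f+1, c :: t =>
    if pvAnchor.isPrefixOf (c :: t) then
      match pvTable.find? (fun q => q.1 == ((c :: t).drop 9).take 4) with
      | some q => q.2 ++ pvBLoop f ((c :: t).drop 13)
      | none => c :: pvBLoop f t
    else c :: pvBLoop f t

def rename_functions_alt (content : String) : String :=
  String.ofList (pvBLoop content.toList.length content.toList)

-- ===== PRECONDITION & SPEC =====
def Spec_rename_functions (content : String) (out : String) : Prop := out = rename_functions_alt content
instance (content : String) (out : String) : Decidable (Spec_rename_functions content out) := by unfold Spec_rename_functions; infer_instance

-- ===== CLAIM (what is proved, stated in full; the proofs are below) =====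
def Claim_equal_rename_functions : Prop := ∀ (content : String), Dom_rename_functions content → Spec_rename_functions content (rename_functions content)

-- ===== LEMMAS AND PROOFS =====

-- proof-only intermediate: the canonical single left-to-right scan over the FULL 13-char keys
def pvPairs : List (List Char × List Char) := pvMaps.map (fun p => (p.1.toList, p.2.toList))

def pvScan (fuel : Nat) (s : List Char) : List Char :=
  match fuel, s with
  | 0, s => s
  | _+1, [] => []
  | fuel+1, c :: t =>
    match pvPairs.find? (fun p => p.1.isPrefixOf (c :: t)) with
    | some p => p.2 ++ pvScan fuel (List.drop p.1.length (c :: t))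
    | none => c :: pvScan fuel t

-- one str.replace step / the fold of all 22 of them, on the List Char side
def pvRepF (s : List Char) (p : List Char × List Char) : List Char := PySem.Chars.replace s p.1 p.2
def pvFold (l : List (List Char × List Char)) (s : List Char) : List Char := l.foldl pvRepF s

-- literal facts about the 22 keys/values (checked by decide)
lemma fact_keys : ∀ p ∈ pvPairs, p.1.length = 13 ∧ p.1.take 2 = ['F', 'U'] ∧ p.2 ≠ [] ∧
    p.2.getD (p.2.length - 1) ' ' ≠ 'F' ∧ (p.2.getD 0 ' ' = 'P' ∨ p.2.getD 0 ' ' = 'G') := by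
  decide

lemma fact_pos : ∀ p ∈ pvPairs, ∀ j < 13, 1 ≤ j →
    (p.1.getD j ' ' ≠ 'F' ∧ p.1.getD j ' ' ≠ 'P' ∧ p.1.getD j ' ' ≠ 'G') := by decide

lemma fact_val_FU : ∀ p ∈ pvPairs, ∀ j < p.2.length,
    p.2.getD j ' ' = 'F' → p.2.getD (j+1) ' ' ≠ 'U' := by decide

lemma fact_nodup : (pvPairs.map (·.1)).Nodup := by decide

-- named projections used below
lemma fact_len (p : List Char × List Char) (hp : p ∈ pvPairs) : p.1.length = 13 :=
  (fact_keys p hp).1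
lemma fact_head (p : List Char × List Char) (hp : p ∈ pvPairs) : p.1.take 2 = ['F', 'U'] :=
  (fact_keys p hp).2.1
lemma fact_val_ne (p : List Char × List Char) (hp : p ∈ pvPairs) : p.2 ≠ [] :=
  (fact_keys p hp).2.2.1
lemma fact_val_last (p : List Char × List Char) (hp : p ∈ pvPairs) :
    p.2.getD (p.2.length - 1) ' ' ≠ 'F' :=
  (fact_keys p hp).2.2.2.1
lemma fact_noF (p : List Char × List Char) (hp : p ∈ pvPairs) (j : Nat) (h1 : 1 ≤ j)
    (h13 : j < 13) : p.1.getD j ' ' ≠ 'F' :=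
  (fact_pos p hp j h13 h1).1
lemma fact_val_head (p : List Char × List Char) (hp : p ∈ pvPairs)
    (q : List Char × List Char) (hq : q ∈ pvPairs) (j : Nat) (h1 : 1 ≤ j) (h13 : j < 13) :
    q.1.getD j ' ' ≠ p.2.getD 0 ' ' := by
  rcases (fact_keys p hp).2.2.2.2 with h | h <;> rw [h]
  · exact (fact_pos q hq j h13 h1).2.1
  · exact (fact_pos q hq j h13 h1).2.2

lemma key_shape (p : List Char × List Char) (hp : p ∈ pvPairs) :
    ∃ k', p.1 = 'F' :: 'U' :: k' := by
  have h := fact_head p hp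
  rcases p with ⟨k, v⟩
  match k, h with
  | a :: b :: k', h => simp_all

lemma key_ne_nil (p : List Char × List Char) (hp : p ∈ pvPairs) : p.1 ≠ [] := by
  obtain ⟨k', hk⟩ := key_shape p hp; simp [hk]

lemma key_inj (p q : List Char × List Char) (hp : p ∈ pvPairs) (hq : q ∈ pvPairs)
    (h : p.1 = q.1) : p = q :=
  List.inj_on_of_nodup_map fact_nodup hp hq h

-- ---- characterisation of PySem.Chars.replace as a left-to-right scan ----
lemma go_zero (k v l acc : List Char) : PySem.Chars.replace.go k v 0 l acc = acc.reverse ++ l := by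
  rw [PySem.Chars.replace.go.eq_def]

lemma go_nil (k v : List Char) (f : Nat) (acc : List Char) :
    PySem.Chars.replace.go k v f [] acc = acc.reverse := by
  cases f <;> rw [PySem.Chars.replace.go.eq_def] <;> simp

lemma go_cons (k v : List Char) (f : Nat) (c : Char) (t acc : List Char) :
    PySem.Chars.replace.go k v (f+1) (c::t) acc =
      if k.isPrefixOf (c::t) then
        PySem.Chars.replace.go k v f (List.drop k.length (c::t)) (v.reverse ++ acc)
      else PySem.Chars.replace.go k v f t (c :: acc) := by
  rw [PySem.Chars.replace.go.eq_def]

lemma go_acc (k v : List Char) (f : Nat) : ∀ l acc,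
    PySem.Chars.replace.go k v f l acc = acc.reverse ++ PySem.Chars.replace.go k v f l [] := by
  induction f with
  | zero => intro l acc; simp [go_zero]
  | succ f ih =>
    intro l acc
    cases l with
    | nil => simp [go_nil]
    | cons c t =>
      rw [go_cons, go_cons]
      split
      · rw [ih (List.drop k.length (c::t)) (v.reverse ++ acc),
            ih (List.drop k.length (c::t)) (v.reverse ++ [])]
        simp
      · rw [ih t (c :: acc), ih t (c :: [])]
        simp

lemma go_fuel (k v : List Char) (hk : k ≠ []) : ∀ n l, l.length ≤ n → ∀ f g : Nat,
    l.length ≤ f → l.length ≤ g →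
    PySem.Chars.replace.go k v f l [] = PySem.Chars.replace.go k v g l [] := by
  have hkl : 1 ≤ k.length := by cases k with | nil => simp at hk | cons a b => simp
  intro n
  induction n with
  | zero =>
    intro l hl f g _ _
    have : l = [] := List.eq_nil_of_length_eq_zero (Nat.le_zero.mp hl)
    subst this
    cases f <;> cases g <;> simp [go_zero, go_nil]
  | succ n ih =>
    intro l hl f g hf hg
    cases l with
    | nil => cases f <;> cases g <;> simp [go_zero, go_nil]
    | cons c t =>
      simp only [List.length_cons] at hl hf hg
      cases f with
      | zero => omega
      | succ f =>
        cases g with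
        | zero => omega
        | succ g =>
          rw [go_cons, go_cons]
          have hdl : (List.drop k.length (c::t)).length ≤ t.length := by
            simp [List.length_drop]; omega
          split
          · rw [go_acc k v f (List.drop k.length (c::t)) _,
                go_acc k v g (List.drop k.length (c::t)) _]
            rw [ih (List.drop k.length (c::t)) (by omega) f g (by omega) (by omega)]
          · rw [go_acc k v f t _, go_acc k v g t _]
            rw [ih t (by omega) f g (by omega) (by omega)]

lemma isEmpty_false_of_ne_nil (k : List Char) (hk : k ≠ []) : k.isEmpty = false := by
  cases k with | nil => simp at hk | cons a b => rfl

-- replace equations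
lemma repl_nil (k v : List Char) (hk : k ≠ []) : PySem.Chars.replace [] k v = [] := by
  simp only [PySem.Chars.replace, isEmpty_false_of_ne_nil k hk]
  simp [go_zero]

lemma repl_cons_neg (k v : List Char) (hk : k ≠ []) (c : Char) (t : List Char)
    (h : k.isPrefixOf (c::t) = false) :
    PySem.Chars.replace (c::t) k v = c :: PySem.Chars.replace t k v := by
  simp only [PySem.Chars.replace, isEmpty_false_of_ne_nil k hk]
  rw [List.length_cons, go_cons, h]
  simp only [Bool.false_eq_true, if_false]
  rw [go_acc k v t.length t [c]]
  simp

lemma repl_cons_pos (k v : List Char) (hk : k ≠ []) (c : Char) (t : List Char)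
    (h : k.isPrefixOf (c::t) = true) :
    PySem.Chars.replace (c::t) k v = v ++ PySem.Chars.replace (List.drop k.length (c::t)) k v := by
  have hkl : 1 ≤ k.length := by cases k with | nil => simp at hk | cons a b => simp
  simp only [PySem.Chars.replace, isEmpty_false_of_ne_nil k hk]
  rw [List.length_cons, go_cons, h]
  simp only [if_true]
  rw [go_acc k v t.length (List.drop k.length (c::t)) _]
  have hdl : (List.drop k.length (c::t)).length ≤ t.length := by
    simp [List.length_drop]; omega
  rw [go_fuel k v hk t.length (List.drop k.length (c::t)) hdl t.length
        (List.drop k.length (c::t)).length hdl (le_refl _)]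
  simp

-- ---- prefix utilities ----
lemma pref_head (a b : Char) (u w : List Char) (h : (a::u).isPrefixOf (b::w) = true) :
    a = b ∧ u.isPrefixOf w = true := by
  simp [List.isPrefixOf] at h
  exact ⟨h.1, List.isPrefixOf_iff_prefix.mpr h.2⟩

lemma pref_cons (a : Char) (u w : List Char) (h : u.isPrefixOf w = true) :
    (a::u).isPrefixOf (a::w) = true := by
  simp [List.isPrefixOf, h]

lemma pref_len_eq (u B r : List Char) (h : u.isPrefixOf (B ++ r) = true)
    (hl : u.length = B.length) : u = B := by
  have := List.isPrefixOf_iff_prefix.mp h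
  rw [List.prefix_iff_eq_take] at this
  rw [this, hl, List.take_left]

-- ---- a replace pass walks through a block in which its key matches nowhere ----
lemma repl_append (k v : List Char) (hk : k ≠ []) : ∀ (B r : List Char),
    (∀ j, j < B.length → k.isPrefixOf (List.drop j B ++ r) = false) →
    PySem.Chars.replace (B ++ r) k v = B ++ PySem.Chars.replace r k v := by
  intro B
  induction B with
  | nil => intro r _; simp
  | cons c B ih =>
    intro r hB
    have h0 : k.isPrefixOf (c :: (B ++ r)) = false := by
      have := hB 0 (by simp)
      simpa using this
    have hB' : ∀ j, j < B.length → k.isPrefixOf (List.drop j B ++ r) = false := by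
      intro j hj
      have := hB (j+1) (by simp; omega)
      simpa using this
    rw [List.cons_append, repl_cons_neg k v hk c (B ++ r) h0, ih r hB']
    simp

-- the three block shapes: a foreign key, the key itself, a value already substituted
lemma repl_skip_key (q p : List Char × List Char) (hq : q ∈ pvPairs) (hp : p ∈ pvPairs)
    (hne : q.1 ≠ p.1) (r : List Char) :
    PySem.Chars.replace (p.1 ++ r) q.1 q.2 = p.1 ++ PySem.Chars.replace r q.1 q.2 := by
  apply repl_append _ _ (key_ne_nil q hq)
  intro j hj
  by_contra hcon
  simp only [Bool.not_eq_false] at hcon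
  cases Nat.eq_zero_or_pos j with
  | inl h0 =>
    subst h0
    simp only [List.drop_zero] at hcon
    exact hne (pref_len_eq q.1 p.1 r hcon (by rw [fact_len q hq, fact_len p hp]))
  | inr h1 =>
    obtain ⟨k', hkq⟩ := key_shape q hq
    rw [List.drop_eq_getElem_cons hj, hkq] at hcon
    have := (pref_head _ _ _ _ hcon).1
    have hF := fact_noF p hp j h1 (by rw [← fact_len p hp]; exact hj)
    rw [List.getD_eq_getElem p.1 ' ' hj] at hF
    exact hF this.symm

lemma repl_hit_key (p : List Char × List Char) (hp : p ∈ pvPairs) (r : List Char) :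
    PySem.Chars.replace (p.1 ++ r) p.1 p.2 = p.2 ++ PySem.Chars.replace r p.1 p.2 := by
  obtain ⟨k', hk⟩ := key_shape p hp
  have hpre : p.1.isPrefixOf (p.1 ++ r) = true :=
    List.isPrefixOf_iff_prefix.mpr (List.prefix_append _ _)
  rw [hk] at hpre ⊢
  rw [List.cons_append, repl_cons_pos _ _ (by simp) _ _ (by rw [← List.cons_append]; exact hpre)]
  rw [← List.cons_append, ← hk, List.drop_left]

lemma repl_skip_val (q p : List Char × List Char) (hq : q ∈ pvPairs) (hp : p ∈ pvPairs)
    (r : List Char) :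
    PySem.Chars.replace (p.2 ++ r) q.1 q.2 = p.2 ++ PySem.Chars.replace r q.1 q.2 := by
  apply repl_append _ _ (key_ne_nil q hq)
  intro j hj
  by_contra hcon
  simp only [Bool.not_eq_false] at hcon
  obtain ⟨k', hkq⟩ := key_shape q hq
  rw [List.drop_eq_getElem_cons hj, hkq] at hcon
  obtain ⟨hF, hrest⟩ := pref_head _ _ _ _ hcon
  have hvF : p.2.getD j ' ' = 'F' := by rw [List.getD_eq_getElem p.2 ' ' hj]; exact hF.symm
  by_cases hj1 : j + 1 < p.2.length
  · rw [List.drop_eq_getElem_cons hj1] at hrest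
    simp only [List.append_eq, List.cons_append] at hrest
    have := (pref_head _ _ _ _ hrest).1
    have hU := fact_val_FU p hp j hj hvF
    rw [List.getD_eq_getElem p.2 ' ' hj1] at hU
    exact hU this.symm
  · have hjeq : j = p.2.length - 1 := by omega
    have := fact_val_last p hp
    rw [← hjeq] at this
    exact this hvF

-- ---- the same for the whole fold (A's 22 chained passes) ----
lemma fold_cons (q : List Char × List Char) (l : List (List Char × List Char)) (s : List Char) :
    pvFold (q :: l) s = pvFold l (PySem.Chars.replace s q.1 q.2) := rfl

lemma fold_nil_input (l : List (List Char × List Char)) (hl : ∀ q ∈ l, q ∈ pvPairs) :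
    pvFold l [] = [] := by
  induction l with
  | nil => rfl
  | cons q l ih =>
    rw [fold_cons, repl_nil _ _ (key_ne_nil q (hl q (by simp)))]
    exact ih (fun q hq => hl q (by simp [hq]))

lemma fold_skip_key (p : List Char × List Char) (hp : p ∈ pvPairs) :
    ∀ (l : List (List Char × List Char)), (∀ q ∈ l, q ∈ pvPairs ∧ q.1 ≠ p.1) → ∀ r,
    pvFold l (p.1 ++ r) = p.1 ++ pvFold l r := by
  intro l
  induction l with
  | nil => intro _ r; rfl
  | cons q l ih =>
    intro hl r
    obtain ⟨hq, hne⟩ := hl q (by simp)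
    rw [fold_cons, repl_skip_key q p hq hp hne r, ih (fun q hq => hl q (by simp [hq])), fold_cons]

lemma fold_through_val (p : List Char × List Char) (hp : p ∈ pvPairs) :
    ∀ (l : List (List Char × List Char)), (∀ q ∈ l, q ∈ pvPairs) → ∀ r,
    pvFold l (p.2 ++ r) = p.2 ++ pvFold l r := by
  intro l
  induction l with
  | nil => intro _ r; rfl
  | cons q l ih =>
    intro hl r
    rw [fold_cons, repl_skip_val q p (hl q (by simp)) hp r,
        ih (fun q hq => hl q (by simp [hq])), fold_cons]

lemma sublist_mem (l : List (List Char × List Char)) (hl : l.Sublist pvPairs) :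
    ∀ q ∈ l, q ∈ pvPairs := fun q hq => hl.subset hq

lemma fold_hit (p : List Char × List Char) (hp : p ∈ pvPairs)
    (l : List (List Char × List Char)) (hl : l.Sublist pvPairs) (hmem : p ∈ l) (r : List Char) :
    pvFold l (p.1 ++ r) = p.2 ++ pvFold l r := by
  obtain ⟨l1, l2, rfl⟩ := List.append_of_mem hmem
  have hnd : ((l1 ++ p :: l2).map (·.1)).Nodup := (hl.map (·.1)).nodup fact_nodup
  rw [List.map_append, List.map_cons] at hnd
  have hl1 : ∀ q ∈ l1, q ∈ pvPairs ∧ q.1 ≠ p.1 := by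
    intro q hq
    refine ⟨sublist_mem _ hl q (by simp [hq]), ?_⟩
    intro hcon
    have hdisj := List.disjoint_of_nodup_append hnd
    have hin : q.1 ∈ List.map (fun x => x.1) l1 := List.mem_map_of_mem hq
    rw [hcon] at hin
    exact hdisj hin (by simp)
  have hl2 : ∀ q ∈ l2, q ∈ pvPairs := fun q hq => sublist_mem _ hl q (by simp [hq])
  rw [show pvFold (l1 ++ p :: l2) (p.1 ++ r) = pvFold (p :: l2) (pvFold l1 (p.1 ++ r)) from
        by simp [pvFold], fold_skip_key p hp l1 hl1 r, fold_cons,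
      repl_hit_key p hp _, fold_through_val p hp l2 hl2 _, ← fold_cons,
      show pvFold (p :: l2) (pvFold l1 r) = pvFold (l1 ++ p :: l2) r from
        by simp [pvFold]]

lemma fold_miss (p : List Char × List Char) (hp : p ∈ pvPairs)
    (l : List (List Char × List Char)) (hl : l.Sublist pvPairs) (hmem : p ∉ l) (r : List Char) :
    pvFold l (p.1 ++ r) = p.1 ++ pvFold l r := by
  apply fold_skip_key p hp l
  intro q hq
  refine ⟨sublist_mem _ hl q hq, fun hcon => hmem ?_⟩
  rw [key_inj q p (sublist_mem _ hl q hq) hp hcon] at hq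
  exact hq

-- ---- a lower key never starts matching inside the head character of an untouched position ----
lemma fold_append_singleton (l : List (List Char × List Char)) (q : List Char × List Char)
    (s : List Char) :
    pvFold (l ++ [q]) s = PySem.Chars.replace (pvFold l s) q.1 q.2 := by
  simp [pvFold, List.foldl_append]
  rfl

lemma fold_cons_nomatch (t : List Char)
    (KP : ∀ l', l'.Sublist pvPairs → ∀ p ∈ pvPairs, ∀ j : Nat, 1 ≤ j →
      (p.1.drop j).isPrefixOf (pvFold l' t) = true → (p.1.drop j).isPrefixOf t = true)
    (c : Char) (hnm : ∀ q ∈ pvPairs, q.1.isPrefixOf (c :: t) = false)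
    (l : List (List Char × List Char)) (hl : l.Sublist pvPairs) :
    pvFold l (c :: t) = c :: pvFold l t := by
  induction l using List.reverseRecOn with
  | nil => rfl
  | append_singleton l q ih =>
    have hl' : l.Sublist pvPairs := (List.sublist_append_left l [q]).trans hl
    have hq : q ∈ pvPairs := hl.subset (by simp)
    rw [fold_append_singleton, fold_append_singleton, ih hl']
    have hnopre : q.1.isPrefixOf (c :: pvFold l t) = false := by
      by_contra hcon
      simp only [Bool.not_eq_false] at hcon
      obtain ⟨k', hk⟩ := key_shape q hq
      rw [hk] at hcon
      obtain ⟨hF, hrest⟩ := pref_head _ _ _ _ hcon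
      have hdrop : q.1.drop 1 = 'U' :: k' := by rw [hk]; rfl
      have h2 := KP l hl' q hq 1 (le_refl 1) (by rw [hdrop]; exact hrest)
      rw [hdrop] at h2
      have h3 : q.1.isPrefixOf (c :: t) = true := by
        rw [hk, ← hF]; exact pref_cons _ _ _ h2
      rw [hnm q hq] at h3
      exact Bool.false_ne_true h3
    rw [repl_cons_neg q.1 q.2 (key_ne_nil q hq) c (pvFold l t) hnopre]

lemma keypre : ∀ n (s : List Char), s.length ≤ n → ∀ l, l.Sublist pvPairs →
    ∀ p ∈ pvPairs, ∀ j : Nat, 1 ≤ j → (p.1.drop j).isPrefixOf (pvFold l s) = true →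
    (p.1.drop j).isPrefixOf s = true := by
  intro n
  induction n with
  | zero =>
    intro s hs l hl p hp j hj hpre
    have hsn : s = [] := List.eq_nil_of_length_eq_zero (Nat.le_zero.mp hs)
    subst hsn
    rwa [fold_nil_input l (sublist_mem l hl)] at hpre
  | succ n ih =>
    intro s hs l hl p hp j hj hpre
    by_cases hj13 : 13 ≤ j
    · have hd : p.1.drop j = [] := by
        apply List.drop_eq_nil_of_le
        rw [fact_len p hp]; omega
      rw [hd]
      simp [List.isPrefixOf]
    · push_neg at hj13
      have hlen : j < p.1.length := by rw [fact_len p hp]; omega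
      have hu : p.1.drop j = p.1[j] :: p.1.drop (j+1) := List.drop_eq_getElem_cons hlen
      cases s with
      | nil =>
        rw [fold_nil_input l (sublist_mem l hl), hu] at hpre
        simp [List.isPrefixOf] at hpre
      | cons c t =>
        by_cases hm : ∃ q ∈ pvPairs, q.1.isPrefixOf (c :: t) = true
        · obtain ⟨q, hq, hqpre⟩ := hm
          obtain ⟨r, hr⟩ := List.isPrefixOf_iff_prefix.mp hqpre
          rw [← hr] at hpre ⊢
          by_cases hql : q ∈ l
          · exfalso
            rw [fold_hit q hq l hl hql r] at hpre
            obtain ⟨v0, v', hv⟩ : ∃ v0 v', q.2 = v0 :: v' := by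
              cases hvne : q.2 with
              | nil => exact absurd hvne (fact_val_ne q hq)
              | cons a b => exact ⟨a, b, rfl⟩
            rw [hu, hv, List.cons_append] at hpre
            have h1 := (pref_head _ _ _ _ hpre).1
            have h2 := fact_val_head q hq p hp j hj hj13
            rw [List.getD_eq_getElem p.1 ' ' hlen] at h2
            have hv0 : q.2.getD 0 ' ' = v0 := by rw [hv]; rfl
            rw [hv0] at h2
            exact h2 h1
          · exfalso
            rw [fold_miss q hq l hl hql r] at hpre
            obtain ⟨k', hk⟩ := key_shape q hq
            rw [hu, hk, List.cons_append] at hpre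
            have h1 := (pref_head _ _ _ _ hpre).1
            have h2 := fact_noF p hp j hj hj13
            rw [List.getD_eq_getElem p.1 ' ' hlen] at h2
            exact h2 h1
        · push_neg at hm
          have hm' : ∀ q ∈ pvPairs, q.1.isPrefixOf (c :: t) = false :=
            fun q hq => Bool.eq_false_iff.mpr (hm q hq)
          simp only [List.length_cons] at hs
          have hKP : ∀ l', l'.Sublist pvPairs → ∀ p' ∈ pvPairs, ∀ j' : Nat, 1 ≤ j' →
              (p'.1.drop j').isPrefixOf (pvFold l' t) = true →
              (p'.1.drop j').isPrefixOf t = true :=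
            fun l' hl' p' hp' j' hj' => ih t (by omega) l' hl' p' hp' j' hj'
          rw [fold_cons_nomatch t hKP c hm' l hl] at hpre
          rw [hu] at hpre ⊢
          obtain ⟨h1, h2⟩ := pref_head _ _ _ _ hpre
          have h3 := ih t (by omega) l hl p hp (j+1) (by omega) h2
          rw [h1]
          exact pref_cons c _ _ h3

-- ---- the canonical scan: equations and fuel irrelevance ----
lemma scan_nil (f : Nat) : pvScan f [] = [] := by cases f <;> rfl

lemma scan_cons_some (f : Nat) (c : Char) (t : List Char) (p : List Char × List Char)
    (h : pvPairs.find? (fun p => p.1.isPrefixOf (c :: t)) = some p) :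
    pvScan (f+1) (c :: t) = p.2 ++ pvScan f (List.drop p.1.length (c :: t)) := by
  rw [pvScan, h]

lemma scan_cons_none (f : Nat) (c : Char) (t : List Char)
    (h : pvPairs.find? (fun p => p.1.isPrefixOf (c :: t)) = none) :
    pvScan (f+1) (c :: t) = c :: pvScan f t := by
  rw [pvScan, h]

lemma scan_fuel : ∀ n (s : List Char), s.length ≤ n → ∀ f g : Nat,
    s.length ≤ f → s.length ≤ g → pvScan f s = pvScan g s := by
  intro n
  induction n with
  | zero =>
    intro s hs f g _ _
    have : s = [] := List.eq_nil_of_length_eq_zero (Nat.le_zero.mp hs)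
    subst this
    rw [scan_nil, scan_nil]
  | succ n ih =>
    intro s hs f g hf hg
    cases s with
    | nil => rw [scan_nil, scan_nil]
    | cons c t =>
      simp only [List.length_cons] at hs hf hg
      cases f with
      | zero => omega
      | succ f =>
        cases g with
        | zero => omega
        | succ g =>
          cases hfind : pvPairs.find? (fun p => p.1.isPrefixOf (c :: t)) with
          | none =>
            rw [scan_cons_none f c t hfind, scan_cons_none g c t hfind,
                ih t (by omega) f g (by omega) (by omega)]
          | some p =>
            have hp : p ∈ pvPairs := List.mem_of_find?_eq_some hfind
            have hkl : 1 ≤ p.1.length := by rw [fact_len p hp]; omega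
            have hdl : (List.drop p.1.length (c :: t)).length ≤ t.length := by
              simp only [List.length_drop, List.length_cons]; omega
            rw [scan_cons_some f c t p hfind, scan_cons_some g c t p hfind,
                ih (List.drop p.1.length (c :: t)) (by omega) f g (by omega) (by omega)]

lemma find_unique {α : Type} (l : List α) (pred : α → Bool) (a : α) (ha : a ∈ l)
    (hpa : pred a = true) (huniq : ∀ b ∈ l, pred b = true → b = a) :
    l.find? pred = some a := by
  induction l with
  | nil => simp at ha
  | cons b l ih =>
    by_cases hb : pred b = true
    · rw [List.find?_cons_of_pos hb, huniq b (by simp) hb]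
    · rw [List.find?_cons_of_neg (by simp [hb])]
      rcases List.mem_cons.mp ha with rfl | ha'
      · exact absurd hpa hb
      · exact ih ha' (fun b' hb' hpb' => huniq b' (by simp [hb']) hpb')

-- ---- A's 22 chained passes equal the canonical single scan ----
lemma main_eq : ∀ n (s : List Char), s.length ≤ n →
    pvFold pvPairs s = pvScan s.length s := by
  intro n
  induction n with
  | zero =>
    intro s hs
    have : s = [] := List.eq_nil_of_length_eq_zero (Nat.le_zero.mp hs)
    subst this
    rw [fold_nil_input pvPairs (fun q hq => hq)]; rfl
  | succ n ih =>
    intro s hs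
    cases s with
    | nil => rw [fold_nil_input pvPairs (fun q hq => hq)]; rfl
    | cons c t =>
      simp only [List.length_cons] at hs ⊢
      by_cases hm : ∃ q ∈ pvPairs, q.1.isPrefixOf (c :: t) = true
      · obtain ⟨q, hq, hqpre⟩ := hm
        obtain ⟨r, hr⟩ := List.isPrefixOf_iff_prefix.mp hqpre
        have hfind : pvPairs.find? (fun p => p.1.isPrefixOf (c :: t)) = some q := by
          apply find_unique _ _ q hq hqpre
          intro b hb hpb
          apply key_inj b q hb hq
          have h1 : b.1 = (c :: t).take b.1.length :=
            List.prefix_iff_eq_take.mp (List.isPrefixOf_iff_prefix.mp hpb)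
          have h2 : q.1 = (c :: t).take q.1.length :=
            List.prefix_iff_eq_take.mp (List.isPrefixOf_iff_prefix.mp hqpre)
          rw [fact_len b hb] at h1
          rw [fact_len q hq] at h2
          rw [h1, h2]
        have hfold : pvFold pvPairs (c :: t) = q.2 ++ pvFold pvPairs r := by
          rw [← hr]; exact fold_hit q hq pvPairs (List.Sublist.refl _) hq r
        have hdrop : List.drop q.1.length (c :: t) = r := by rw [← hr, List.drop_left]
        have hrlen : r.length ≤ t.length := by
          have hlen : (q.1 ++ r).length = t.length + 1 := by rw [hr]; simp
          have hql : q.1.length = 13 := fact_len q hq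
          rw [List.length_append, hql] at hlen
          omega
        have hx : pvFold pvPairs r = pvScan t.length r := by
          rw [ih r (by omega)]
          exact scan_fuel t.length r hrlen r.length t.length (le_refl _) hrlen
        rw [hfold, scan_cons_some t.length c t q hfind, hdrop, hx]
      · push_neg at hm
        have hm' : ∀ q ∈ pvPairs, q.1.isPrefixOf (c :: t) = false :=
          fun q hq => Bool.eq_false_iff.mpr (hm q hq)
        have hfind : pvPairs.find? (fun p => p.1.isPrefixOf (c :: t)) = none :=
          List.find?_eq_none.mpr (fun q hq => by simp [hm' q hq])
        rw [scan_cons_none t.length c t hfind,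
            fold_cons_nomatch t
              (fun l' hl' p' hp' j' hj' => keypre n t (by omega) l' hl' p' hp' j' hj')
              c hm' pvPairs (List.Sublist.refl _),
            ih t (by omega)]

-- ---- B's anchored scan equals the canonical scan ----
lemma pairs_eq_map : pvPairs = pvTable.map (fun q => (pvAnchor ++ q.1, q.2)) := by decide

lemma tab_len : ∀ q ∈ pvTable, q.1.length = 4 := by decide

lemma anchor_len : pvAnchor.length = 9 := by decide

lemma find?_ext {α : Type} (l : List α) (p q : α → Bool) (h : ∀ a ∈ l, p a = q a) :
    l.find? p = l.find? q := by
  induction l with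
  | nil => rfl
  | cons a l ih =>
    have ha := h a (by simp)
    by_cases hp : p a = true
    · rw [List.find?_cons_of_pos hp, List.find?_cons_of_pos (ha ▸ hp)]
    · rw [List.find?_cons_of_neg hp, List.find?_cons_of_neg (by rw [← ha]; exact hp),
          ih (fun a ha' => h a (by simp [ha']))]

lemma isPrefixOf_append (a b s : List Char) :
    (a ++ b).isPrefixOf s = (a.isPrefixOf s && b.isPrefixOf (s.drop a.length)) := by
  induction a generalizing s with
  | nil => simp [List.isPrefixOf]
  | cons x a ih =>
    cases s with
    | nil => simp [List.isPrefixOf]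
    | cons y t => simp [List.isPrefixOf, ih t, Bool.and_assoc]

lemma isPrefixOf_eq_beq_take (u w : List Char) :
    u.isPrefixOf w = (u == w.take u.length) := by
  by_cases h : u.isPrefixOf w = true
  · rw [h]
    have := List.prefix_iff_eq_take.mp (List.isPrefixOf_iff_prefix.mp h)
    exact (beq_iff_eq.mpr this).symm
  · rw [Bool.eq_false_iff.mpr h]
    by_contra hcon
    have : (u == w.take u.length) = true := by
      cases hc : (u == w.take u.length) <;> simp_all
    have hu : u = w.take u.length := beq_iff_eq.mp this
    exact h (List.isPrefixOf_iff_prefix.mpr (List.prefix_iff_eq_take.mpr hu))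

lemma find_pairs (s : List Char) :
    pvPairs.find? (fun p => p.1.isPrefixOf s) =
      (if pvAnchor.isPrefixOf s then
        pvTable.find? (fun q => q.1 == (s.drop 9).take 4) else none).map
        (fun q => (pvAnchor ++ q.1, q.2)) := by
  rw [pairs_eq_map, List.find?_map]
  by_cases h : pvAnchor.isPrefixOf s = true
  · rw [if_pos h]
    congr 1
    apply find?_ext
    intro q hq
    show (pvAnchor ++ q.1).isPrefixOf s = (q.1 == (s.drop 9).take 4)
    rw [isPrefixOf_append, h, anchor_len, Bool.true_and,
        isPrefixOf_eq_beq_take, tab_len q hq]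
  · rw [if_neg (by simpa using h)]
    have hn : List.find? ((fun p => p.1.isPrefixOf s) ∘ fun q => (pvAnchor ++ q.1, q.2))
        pvTable = none := by
      rw [List.find?_eq_none]
      intro q hq
      show ¬ ((pvAnchor ++ q.1).isPrefixOf s = true)
      rw [isPrefixOf_append, Bool.eq_false_iff.mpr h]
      simp
    rw [hn]

lemma bloop_eq_scan : ∀ (f : Nat) (s : List Char), pvBLoop f s = pvScan f s := by
  intro f
  induction f with
  | zero => intro s; rfl
  | succ f ih =>
    intro s
    cases s with
    | nil => rfl
    | cons c t =>
      by_cases h : pvAnchor.isPrefixOf (c :: t) = true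
      · cases hf : pvTable.find? (fun q => q.1 == ((c :: t).drop 9).take 4) with
        | none =>
          have hfind : pvPairs.find? (fun p => p.1.isPrefixOf (c :: t)) = none := by
            rw [find_pairs, if_pos h, hf]; rfl
          rw [scan_cons_none f c t hfind]
          show (if pvAnchor.isPrefixOf (c :: t) then _ else _) = _
          rw [if_pos h, hf]
          rw [ih t]
        | some q =>
          have hfind : pvPairs.find? (fun p => p.1.isPrefixOf (c :: t)) =
              some (pvAnchor ++ q.1, q.2) := by
            rw [find_pairs, if_pos h, hf]; rfl
          rw [scan_cons_some f c t _ hfind]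
          show (if pvAnchor.isPrefixOf (c :: t) then _ else _) = _
          rw [if_pos h, hf]
          have hq : q ∈ pvTable := List.mem_of_find?_eq_some hf
          have hlen : (pvAnchor ++ q.1, q.2).1.length = 13 := by
            show (pvAnchor ++ q.1).length = 13
            rw [List.length_append, anchor_len, tab_len q hq]
          rw [hlen, ih]
      · have hfind : pvPairs.find? (fun p => p.1.isPrefixOf (c :: t)) = none := by
          rw [find_pairs, if_neg h]; rfl
        rw [scan_cons_none f c t hfind]
        show (if pvAnchor.isPrefixOf (c :: t) then _ else _) = _
        rw [if_neg h, ih t]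

-- ---- bridges from the String-level ports to the List Char level ----
set_option maxHeartbeats 2000000 in
lemma items_eq : (PySem.Dict.ofList pvMaps).items = pvMaps := by rfl

lemma fold_str : ∀ (l : List (String × String)) (s : String),
    (l.foldl (fun c p => PySem.Str.replace c p.1 p.2) s).toList =
    pvFold (l.map (fun p => (p.1.toList, p.2.toList))) s.toList := by
  intro l
  induction l with
  | nil => intro s; rfl
  | cons q l ih =>
    intro s
    simp only [List.foldl_cons, List.map_cons]
    rw [ih (PySem.Str.replace s q.1 q.2), fold_cons, PySem.Str.toList_replace]

-- ===== VERDICT (by name: the statement is the Claim_ definition above) =====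
theorem rename_functions_spec : Claim_equal_rename_functions := by
  intro content _
  show rename_functions content = rename_functions_alt content
  apply String.toList_inj.mp
  rw [rename_functions_alt, String.toList_ofList, bloop_eq_scan]
  rw [show rename_functions content =
        pvMaps.foldl (fun c p => PySem.Str.replace c p.1 p.2) content from by
      rw [rename_functions, items_eq]]
  rw [fold_str pvMaps content]
  exact main_eq content.toList.length content.toList (le_refl _)
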